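-- pv_equiv track=rewrite | github.com/YuXuan928/Python | 1.Python/作業/作業2/2.3.1.math1(join_map).py | topic1
-- ===== SOURCE A (Python) =====
-- def topic1(n):
--     sum=0
--     lst=[]
--     for i in range(1, n+1):
--         sum+=i
--         lst.append(str(i))
--     #st="+".join(lst[:4])+'...+'+lst[-1]+"="
--     st="+".join(map(str, lst[:4]))+'...+'+lst[-1]+"=" #同上
--     return sum, st
-- ===== SOURCE B (Python) =====
-- def topic1(n):
--     # Closed form instead of the O(n) loop: sum = n(n+1)//2; the string only
--     # needs the first 4 terms and the last term, read off the range directly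
--     # (r[-1] raises IndexError on an empty range, as A's lst[-1] does).
--     total = n * (n + 1) // 2
--     r = range(1, n + 1)
--     head = "+".join(map(str, r[:4]))
--     return total, head + "...+" + str(r[-1]) + "="
-- ===== Notes on version B (the rewrite author's own statement) =====
-- stated objective: faster
-- what changed: Replaces the O(n) accumulation loop and full list of n strings with the closed form n(n+1)//2 and a string read directly off the range object (first 4 terms and r[-1]).
import Mathlib
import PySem

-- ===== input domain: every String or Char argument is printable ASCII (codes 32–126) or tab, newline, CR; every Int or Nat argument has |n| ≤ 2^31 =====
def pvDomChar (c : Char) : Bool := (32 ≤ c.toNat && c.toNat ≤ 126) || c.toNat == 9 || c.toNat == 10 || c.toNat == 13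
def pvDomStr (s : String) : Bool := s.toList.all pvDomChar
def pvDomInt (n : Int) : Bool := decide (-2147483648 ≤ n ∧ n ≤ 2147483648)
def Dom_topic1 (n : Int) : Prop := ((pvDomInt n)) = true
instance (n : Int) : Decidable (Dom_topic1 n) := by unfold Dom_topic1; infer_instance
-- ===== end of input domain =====

-- B replaces A's O(n) accumulation loop with the closed form n(n+1)//2 and builds the
-- string from only the first 4 terms and the last term of the range.

-- ===== PORT A =====
def topic1 (n : Int) : Int × String :=
  -- loop: sum += i; lst.append(str(i))
  let st := (PySem.List.pyRange 1 (n + 1) 1).foldl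
    (fun (st : Int × List String) i => (st.1 + i, PySem.Int.toStr i :: st.2)) (0, [])
  let sum := st.1
  let lst := st.2.reverse  -- append-loop accumulator, kept reversed for O(n) evaluation
  -- "+".join(map(str, lst[:4])) + '...+' + lst[-1] + "="  (lst[-1]: IndexError when n < 1, excluded by Pre_)
  let s := PySem.Str.join "+" (PySem.List.slice lst none (some 4)) ++ "...+" ++
           (PySem.List.pyGet? lst (-1)).getD "" ++ "="
  (sum, s)

-- ===== PORT B =====
def topic1_alt (n : Int) : Int × String :=
  let total := PySem.Int.floordiv (n * (n + 1)) 2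
  let r := PySem.List.pyRange 1 (n + 1) 1
  -- "+".join(map(str, r[:4]))
  let head := PySem.Str.join "+" ((PySem.List.slice r none (some 4)).map PySem.Int.toStr)
  -- str(r[-1])  (IndexError when the range is empty, excluded by Pre_)
  (total, head ++ "...+" ++ PySem.Int.toStr ((PySem.List.pyGet? r (-1)).getD 0) ++ "=")

-- ===== PRECONDITION & SPEC =====
-- Pre_ excludes exactly n < 1, where both programs raise IndexError (indexing the empty list/range).
def Pre_topic1 (n : Int) : Prop := 1 ≤ n
instance (n : Int) : Decidable (Pre_topic1 n) := by unfold Pre_topic1; infer_instance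
def pvWitness_topic1 : Int := (5)

def Spec_topic1 (n : Int) (out : Int × String) : Prop := out = topic1_alt n
instance (n : Int) (out : Int × String) : Decidable (Spec_topic1 n out) := by unfold Spec_topic1; infer_instance

-- ===== CLAIM (what is proved, stated in full; the proofs are below) =====
def Claim_equal_topic1 : Prop := ∀ (n : Int), Dom_topic1 n → Pre_topic1 n → Spec_topic1 n (topic1 n)

-- ===== LEMMAS AND PROOFS =====

-- the loop's fold, characterized on any list of values
lemma fold_char (r : List Int) (s0 : Int) (l0 : List String) :
    r.foldl (fun (st : Int × List String) i => (st.1 + i, PySem.Int.toStr i :: st.2)) (s0, l0)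
      = (s0 + r.sum, (r.map PySem.Int.toStr).reverse ++ l0) := by
  induction r generalizing s0 l0 with
  | nil => simp
  | cons x xs ih =>
    rw [List.foldl_cons, ih]
    simp only [List.sum_cons, List.map_cons, List.reverse_cons, List.append_assoc,
      List.cons_append, List.nil_append, Prod.mk.injEq]
    exact ⟨by ring, trivial⟩

lemma two_mul_sum (m : Nat) :
    2 * (PySem.List.pyRange 1 ((m : Int) + 1) 1).sum = (m : Int) * (m + 1) := by
  induction m with
  | zero => rw [PySem.List.pyRange_one_eq_nil (by norm_num)]; simp
  | succ m ih =>
    push_cast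
    rw [PySem.List.pyRange_one_succ_right (by omega)]
    rw [List.sum_append, List.sum_cons, List.sum_nil]
    push_cast at ih
    linarith

lemma sum_pyRange (n : Int) (hn : 0 ≤ n) :
    (PySem.List.pyRange 1 (n + 1) 1).sum = PySem.Int.floordiv (n * (n + 1)) 2 := by
  have hcast : ((n.toNat : Int)) = n := by omega
  have h2 := two_mul_sum n.toNat
  rw [hcast] at h2
  symm
  rw [PySem.Int.floordiv_eq_iff_of_pos (by norm_num)]
  constructor <;> linarith

lemma last_pyRange (n : Int) (hn : 1 ≤ n) :
    (PySem.List.pyRange 1 (n + 1) 1).getLast? = some n := by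
  rw [PySem.List.pyRange_one_succ_right hn]
  simp

-- ===== VERDICT (by name: the statement is the Claim_ definition above) =====
theorem topic1_spec : Claim_equal_topic1 := by
  intro n _ hpre
  unfold Spec_topic1 topic1 topic1_alt
  rw [fold_char]
  simp only [List.append_nil, List.reverse_reverse, Int.zero_add]
  rw [sum_pyRange n (by exact le_trans (by norm_num) hpre),
    PySem.List.slice_to _ (by norm_num : (0:Int) ≤ 4),
    PySem.List.slice_to _ (by norm_num : (0:Int) ≤ 4),
    PySem.List.pyGet?_neg_one, PySem.List.pyGet?_neg_one,
    ← List.map_take, List.getLast?_map, last_pyRange n hpre]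
  simp [Option.getD]
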